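-- pv_equiv track=rewrite | github.com/thomasahle/konkurrence | codejam/2021/1a/b.py | solve
-- ===== SOURCE A (Python) =====
-- from itertools import chain, combinations
--
-- def subsets(iterable):
--     xs = list(iterable)
--     return chain.from_iterable(combinations(xs,n) for n in range(len(xs)+1))
--
-- def solve(ps, ns):
--     pns = [p for p, n in zip(ps, ns) for _ in range(n)]
--     sum_ = sum(pns)
--     best = 0
--     for js in subsets(range(len(pns))):
--         a, b = sum_, 1
--         for j in js:
--             a -= pns[j]
--             b *= pns[j]
--         if a == b:
--             best = max(best, b)
--     return best
-- ===== SOURCE B (Python) =====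
-- def solve(ps, ns):
--     pns = [p for p, n in zip(ps, ns) for _ in range(n)]
--     total = sum(pns)
--     # DP over elements: set of reachable (subset_sum, subset_product) pairs,
--     # deduplicated as we go instead of enumerating all 2^N index subsets.
--     states = {(0, 1)}
--     for x in pns:
--         states |= {(a + x, b * x) for a, b in states}
--     best = 0
--     for a, b in states:
--         if total - a == b:
--             best = max(best, b)
--     return best
-- ===== Notes on version B (the rewrite author's own statement) =====
-- stated objective: alternative
-- what changed: Replaces enumeration of all 2^N index subsets (with an inner sum/product loop per subset) by a one-pass DP that maintains the deduplicated set of reachable (subset_sum, subset_product) pairs and takes the conditional max over that set; the dedup shrinks the search when values repeat or states collide, but worst case stays exponential.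
import Mathlib
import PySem

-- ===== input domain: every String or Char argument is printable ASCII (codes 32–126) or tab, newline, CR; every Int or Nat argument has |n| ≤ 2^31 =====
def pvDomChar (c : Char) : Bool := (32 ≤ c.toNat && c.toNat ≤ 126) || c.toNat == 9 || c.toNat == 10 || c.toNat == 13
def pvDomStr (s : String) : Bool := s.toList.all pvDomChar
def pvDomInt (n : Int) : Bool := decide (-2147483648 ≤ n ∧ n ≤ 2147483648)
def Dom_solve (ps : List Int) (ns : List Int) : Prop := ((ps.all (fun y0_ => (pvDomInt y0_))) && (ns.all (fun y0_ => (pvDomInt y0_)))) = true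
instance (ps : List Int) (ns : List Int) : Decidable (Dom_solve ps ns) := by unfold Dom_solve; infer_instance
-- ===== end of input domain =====

-- B replaces A's enumeration of all 2^N index subsets by a one-pass DP over a
-- deduplicated set of reachable (subset_sum, subset_product) pairs.

-- ===== PORT A =====

-- port of subsets(): chain.from_iterable(combinations(xs, n) for n in range(len(xs)+1))
def subsetsPort (xs : List Int) : List (List Int) :=
  (List.range (xs.length + 1)).flatMap (fun n => PySem.List.combinations xs n)

def solve (ps : List Int) (ns : List Int) : Int :=
  let pns := (ps.zip ns).flatMap (fun pn => List.replicate pn.2.toNat pn.1)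
  let sum_ := pns.sum
  (subsetsPort (PySem.List.pyRange 0 pns.length 1)).foldl
    (fun best js =>
      let ab := js.foldl
        (fun ab j => (ab.1 - PySem.List.pyGetD pns j 0, ab.2 * PySem.List.pyGetD pns j 0))
        (sum_, 1)
      if ab.1 = ab.2 then max best ab.2 else best) 0

-- ===== PORT B =====

def solve_alt (ps : List Int) (ns : List Int) : Int :=
  let pns := (ps.zip ns).flatMap (fun pn => List.replicate pn.2.toNat pn.1)
  let total := pns.sum
  let states : PySem.Set (Int × Int) :=
    pns.foldl
      (fun st x => PySem.Set.update st (st.map (fun ab => (ab.1 + x, ab.2 * x))))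
      (PySem.Set.ofList [((0 : Int), (1 : Int))])
  states.foldl (fun best ab => if total - ab.1 = ab.2 then max best ab.2 else best) 0

-- ===== PRECONDITION & SPEC =====
def Spec_solve (ps : List Int) (ns : List Int) (out : Int) : Prop := out = solve_alt ps ns
instance (ps : List Int) (ns : List Int) (out : Int) : Decidable (Spec_solve ps ns out) := by unfold Spec_solve; infer_instance

-- ===== CLAIM (what is proved, stated in full; the proofs are below) =====
def Claim_equal_solve : Prop := ∀ (ps : List Int) (ns : List Int), Dom_solve ps ns → Spec_solve ps ns (solve ps ns)

-- ===== LEMMAS AND PROOFS =====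

-- A conditional running max equals the fold of max over the filtered, mapped values.
theorem condMax_eq {α : Type} (L : List α) (p : α → Bool) (g : α → Int) (c : Int) :
    L.foldl (fun acc y => if p y then max acc (g y) else acc) c
      = ((L.filter p).map g).foldl max c := by
  rw [PySem.List.foldl_if_eq_foldl_filter, List.foldl_map]

-- fold of max from 0 only depends on the set of members.
theorem foldl_max_congr_mem (V1 V2 : List Int) (h : ∀ x, x ∈ V1 ↔ x ∈ V2) :
    V1.foldl max 0 = V2.foldl max 0 := by
  apply le_antisymm
  · rcases PySem.List.foldl_max_mem V1 0 with h1 | h1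
    · rw [h1]; exact (PySem.List.le_foldl_max V2 0).1
    · exact (PySem.List.le_foldl_max V2 0).2 _ ((h _).mp h1)
  · rcases PySem.List.foldl_max_mem V2 0 with h2 | h2
    · rw [h2]; exact (PySem.List.le_foldl_max V1 0).1
    · exact (PySem.List.le_foldl_max V1 0).2 _ ((h _).mpr h2)

-- A's inner loop computes (a - Σ selected, b * Π selected).
theorem innerFold_eq (pns : List Int) (js : List Int) (a b : Int) :
    js.foldl (fun ab j => (ab.1 - PySem.List.pyGetD pns j 0, ab.2 * PySem.List.pyGetD pns j 0)) (a, b)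
      = (a - (js.map (fun j => PySem.List.pyGetD pns j 0)).sum,
         b * (js.map (fun j => PySem.List.pyGetD pns j 0)).prod) := by
  induction js generalizing a b with
  | nil => simp
  | cons j js ih =>
      simp only [List.foldl_cons, ih, List.map_cons, List.sum_cons, List.prod_cons,
        Prod.mk.injEq]
      constructor <;> ring

-- membership in A's candidate list = sublists of the index range
theorem mem_subsetsPort (xs : List Int) (js : List Int) :
    js ∈ subsetsPort xs ↔ js.Sublist xs := by
  simp only [subsetsPort, List.mem_flatMap, List.mem_range,
    PySem.List.mem_combinations_iff]
  constructor
  · rintro ⟨n, _, hs, _⟩; exact hs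
  · intro hs
    exact ⟨js.length, by have := hs.length_le; omega, hs, rfl⟩

-- crux: lookups along sublists of `range (length pns)` yield exactly the sublists of pns
theorem map_getD_sublist_range (pns : List Int) (s : List Int) :
    (∃ ks : List Nat, ks.Sublist (List.range pns.length) ∧
        s = ks.map (fun k => pns.getD k 0)) ↔ s.Sublist pns := by
  induction pns generalizing s with
  | nil =>
      simp only [List.length_nil, List.range_zero, List.sublist_nil]
      constructor
      · rintro ⟨ks, hks, rfl⟩; simp [hks]
      · rintro rfl; exact ⟨[], by simp⟩
  | cons x rest ih =>
      rw [List.sublist_cons_iff]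
      constructor
      · rintro ⟨ks, hks, rfl⟩
        rw [List.length_cons, List.range_succ_eq_map, List.sublist_cons_iff] at hks
        rcases hks with hks | ⟨r, rfl, hr⟩
        · left
          rcases List.sublist_map_iff.mp hks with ⟨ks', hks', rfl⟩
          refine (ih _).mp ⟨ks', hks', ?_⟩
          simp [Function.comp]
        · right
          rcases List.sublist_map_iff.mp hr with ⟨ks', hks', rfl⟩
          refine ⟨(ks'.map (fun k => rest.getD k 0)), ?_, (ih _).mp ⟨ks', hks', rfl⟩⟩
          simp [Function.comp]
      · rintro (hs | ⟨r, rfl, hr⟩)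
        · rcases (ih s).mpr hs with ⟨ks, hks, rfl⟩
          refine ⟨ks.map Nat.succ, ?_, ?_⟩
          · rw [List.length_cons, List.range_succ_eq_map]
            exact (hks.map Nat.succ).cons _
          · simp [Function.comp]
        · rcases (ih r).mpr hr with ⟨ks, hks, rfl⟩
          refine ⟨0 :: ks.map Nat.succ, ?_, ?_⟩
          · rw [List.length_cons, List.range_succ_eq_map]
            exact (hks.map Nat.succ).cons₂ _
          · simp [Function.comp]

-- same fact, phrased for A's Int-valued index range
theorem exists_js_iff (pns : List Int) (s : List Int) :
    (∃ js : List Int, js.Sublist (PySem.List.pyRange 0 pns.length 1) ∧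
        s = js.map (fun j => PySem.List.pyGetD pns j 0)) ↔ s.Sublist pns := by
  rw [← map_getD_sublist_range, PySem.List.pyRange_one]
  simp only [sub_zero, Int.toNat_natCast, zero_add]
  constructor
  · rintro ⟨js, hjs, rfl⟩
    rcases List.sublist_map_iff.mp hjs with ⟨ks, hks, rfl⟩
    exact ⟨ks, hks, by simp [List.map_map, Function.comp_def]⟩
  · rintro ⟨ks, hks, rfl⟩
    refine ⟨_, List.Sublist.map _ hks, ?_⟩
    simp [List.map_map, Function.comp_def]

-- B's state set after folding over xs, from any start set
theorem mem_states (xs : List Int) (st : List (Int × Int)) (y : Int × Int) :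
    y ∈ xs.foldl
        (fun st x => PySem.Set.update st (st.map (fun ab => (ab.1 + x, ab.2 * x)))) st
      ↔ ∃ ab ∈ st, ∃ s : List Int, s.Sublist xs ∧ y = (ab.1 + s.sum, ab.2 * s.prod) := by
  induction xs generalizing st with
  | nil =>
      simp only [List.foldl_nil, List.sublist_nil]
      constructor
      · intro hy; exact ⟨y, hy, [], rfl, by simp⟩
      · rintro ⟨ab, hab, s, rfl, rfl⟩; simpa using hab
  | cons x xs ih =>
      rw [List.foldl_cons, ih]
      constructor
      · rintro ⟨ab, hab, s, hs, rfl⟩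
        rw [PySem.Set.mem_update] at hab
        rcases hab with hab | hab
        · exact ⟨ab, hab, s, hs.cons x, rfl⟩
        · rcases List.mem_map.mp hab with ⟨ab0, hab0, rfl⟩
          refine ⟨ab0, hab0, x :: s, hs.cons₂ x, ?_⟩
          simp only [List.sum_cons, List.prod_cons, Prod.mk.injEq]
          constructor <;> dsimp only <;> ring
      · rintro ⟨ab, hab, s, hs, rfl⟩
        rw [List.sublist_cons_iff] at hs
        rcases hs with hs | ⟨r, rfl, hr⟩
        · exact ⟨ab, by rw [PySem.Set.mem_update]; exact Or.inl hab, s, hs, rfl⟩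
        · refine ⟨(ab.1 + x, ab.2 * x), ?_, r, hr, ?_⟩
          · rw [PySem.Set.mem_update]
            exact Or.inr (List.mem_map.mpr ⟨ab, hab, rfl⟩)
          · simp only [List.sum_cons, List.prod_cons, Prod.mk.injEq]
            constructor <;> dsimp only <;> ring

-- ===== VERDICT (by name: the statement is the Claim_ definition above) =====
theorem solve_spec : Claim_equal_solve := by
  intro ps ns _
  show solve ps ns = solve_alt ps ns
  unfold solve solve_alt
  set pns := (ps.zip ns).flatMap (fun pn => List.replicate pn.2.toNat pn.1) with hpns
  simp only []
  rw [show (fun (best : Int) (js : List Int) =>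
        let ab := js.foldl
          (fun ab j => (ab.1 - PySem.List.pyGetD pns j 0, ab.2 * PySem.List.pyGetD pns j 0))
          (pns.sum, 1)
        if ab.1 = ab.2 then max best ab.2 else best)
      = (fun best js =>
        if (decide ((js.foldl (fun ab j => (ab.1 - PySem.List.pyGetD pns j 0, ab.2 * PySem.List.pyGetD pns j 0)) (pns.sum, 1)).1
              = (js.foldl (fun ab j => (ab.1 - PySem.List.pyGetD pns j 0, ab.2 * PySem.List.pyGetD pns j 0)) (pns.sum, 1)).2) : Bool)
        then max best ((js.foldl (fun ab j => (ab.1 - PySem.List.pyGetD pns j 0, ab.2 * PySem.List.pyGetD pns j 0)) (pns.sum, 1)).2)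
        else best) from by funext best js; simp]
  rw [show (fun (best : Int) (ab : Int × Int) => if pns.sum - ab.1 = ab.2 then max best ab.2 else best)
      = (fun best ab => if (decide (pns.sum - ab.1 = ab.2) : Bool) then max best ab.2 else best)
      from by funext best ab; simp]
  rw [condMax_eq, condMax_eq]
  apply foldl_max_congr_mem
  intro v
  simp only [List.mem_map, List.mem_filter, decide_eq_true_eq]
  constructor
  · rintro ⟨js, ⟨hjs, hcond⟩, rfl⟩
    rw [mem_subsetsPort] at hjs
    rw [innerFold_eq] at hcond ⊢
    have hsub : (js.map (fun j => PySem.List.pyGetD pns j 0)).Sublist pns :=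
      (exists_js_iff pns _).mp ⟨js, hjs, rfl⟩
    refine ⟨((js.map (fun j => PySem.List.pyGetD pns j 0)).sum,
             (js.map (fun j => PySem.List.pyGetD pns j 0)).prod), ?_, by simp⟩
    refine ⟨(mem_states pns _ _).mpr ⟨(0, 1), by simp [PySem.Set.ofList], _, hsub, by simp⟩, ?_⟩
    simp only at hcond
    omega
  · rintro ⟨ab, ⟨hab, hcond⟩, rfl⟩
    rcases (mem_states pns _ _).mp hab with ⟨ab0, hab0, s, hs, rfl⟩
    have hab0' : ab0 = (0, 1) := by simpa [PySem.Set.ofList] using hab0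
    subst hab0'
    rcases (exists_js_iff pns s).mpr hs with ⟨js, hjs, rfl⟩
    refine ⟨js, ⟨(mem_subsetsPort _ _).mpr hjs, ?_⟩, ?_⟩
    · rw [innerFold_eq]
      simp only at hcond ⊢
      omega
    · rw [innerFold_eq]
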